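-- pv_equiv track=rewrite | github.com/arunma/dsa_python | zed/maximum_number_of_books_you_can_take.py | maximumBooks
-- ===== SOURCE A (Python) =====
-- from typing import List
--
-- def maximumBooks(books: List[int]) -> int:
--     N = len(books)
--     max_books = float('-inf')
--     for i in range(N):
--         prev_taken = books[i]
--         curr_so_far = prev_taken
--         for j in range(i - 1, -1, -1):
--             curr = min(books[j], prev_taken - 1)
--             if curr < 1:
--                 break
--             curr_so_far += curr
--             prev_taken = curr
--         max_books = max(curr_so_far, max_books)
--     return max_books
-- ===== SOURCE B (Python) =====
-- from typing import List
--
-- def maximumBooks(books: List[int]) -> int: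
--     # Monotonic stack + DP with closed-form arithmetic sums (LeetCode 2355 style), O(n).
--     n = len(books)
--     dp = []
--     stack = []
--     for i in range(n):
--         while stack and books[stack[-1]] - stack[-1] >= books[i] - i:
--             stack.pop()
--         j = stack[-1] if stack else -1
--         if books[i] < 1:
--             dp.append(books[i])
--         else:
--             t = min(i - j, books[i])
--             s = t * (2 * books[i] - t + 1) // 2
--             if t == i - j and j >= 0 and books[j] >= 1:
--                 s += dp[j]
--             dp.append(s)
--         stack.append(i)
--     return max(dp)
-- ===== Notes on version B (the rewrite author's own statement) =====
-- stated objective: faster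
-- what changed: Replaces A's per-start-index backward simulation of the decreasing take (O(n^2)) by a single left-to-right pass with a monotonic stack of indices keyed by books[j]-j, computing each per-index total from a closed-form arithmetic-series sum plus a reused dp value at the stack boundary (LeetCode 2355 technique).
-- outside the precondition, e.g. on maximumBooks([]): A returns -inf, B raises ValueError
import Mathlib
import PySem

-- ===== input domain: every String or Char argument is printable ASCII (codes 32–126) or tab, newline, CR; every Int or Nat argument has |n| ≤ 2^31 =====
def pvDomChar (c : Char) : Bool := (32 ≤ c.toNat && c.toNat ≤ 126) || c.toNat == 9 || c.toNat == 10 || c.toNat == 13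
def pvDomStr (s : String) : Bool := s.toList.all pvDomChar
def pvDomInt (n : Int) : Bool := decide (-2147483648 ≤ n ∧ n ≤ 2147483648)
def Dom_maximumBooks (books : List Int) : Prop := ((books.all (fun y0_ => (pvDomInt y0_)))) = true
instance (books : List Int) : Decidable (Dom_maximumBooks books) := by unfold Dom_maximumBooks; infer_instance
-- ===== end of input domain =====

-- B replaces A's quadratic per-index backward simulation by the monotonic-stack DP with
-- closed-form arithmetic-series sums (LeetCode 2355), O(n) instead of O(n^2).

-- ===== PORT A =====
-- inner 'for j in range(i-1, -1, -1)' loop of A; the fuel argument is j+1, so positions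
-- j = fuel-1, …, 0 are visited; indices are loop variables always in range, so getD is exact.
def loopA (books : List Int) : Nat → Int → Int → Int
  | 0, _, acc => acc
  | j + 1, prev, acc =>
    let curr := min (books.getD j 0) (prev - 1)
    if curr < 1 then acc else loopA books j curr (acc + curr)

-- 'max_books' starts as float('-inf'): modelled as 'none'; A returns it only on [], which Pre_ excludes.
def maximumBooks (books : List Int) : Int :=
  ((List.range books.length).foldl
      (fun (mb : Option Int) i =>
        let start := books.getD i 0
        let tot := loopA books i start start
        some (match mb with | none => tot | some m => max tot m))
      none).getD 0

-- ===== PORT B =====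
-- 'while stack and books[stack[-1]] - stack[-1] >= books[i] - i: stack.pop()'
-- (stack is stored top-first)
def popW (books : List Int) (ki : Int) : List Nat → List Nat
  | [] => []
  | p :: rest =>
    if books.getD p 0 - (p : Int) ≥ ki then popW books ki rest else p :: rest

-- one iteration of B's main loop; state = (stack, dp); indices in range, so getD is exact.
def stepB (books : List Int) (st : List Nat × List Int) (i : Nat) : List Nat × List Int :=
  let bi := books.getD i 0
  let stack := popW books (bi - (i : Int)) st.1
  let j : Int := match stack with | [] => -1 | p :: _ => (p : Int)
  let d : Int :=
    if bi < 1 then bi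
    else
      let t := min ((i : Int) - j) bi
      let s := PySem.Int.floordiv (t * (2 * bi - t + 1)) 2
      if t = (i : Int) - j ∧ 0 ≤ j ∧ 1 ≤ books.getD j.toNat 0 then s + st.2.getD j.toNat 0
      else s
  (i :: stack, st.2 ++ [d])

def maximumBooks_alt (books : List Int) : Int :=
  let dp := ((List.range books.length).foldl (stepB books) ([], [])).2
  (dp.max?).getD 0   -- Python 'max(dp)' raises on empty dp; Pre_ excludes books = []

-- ===== PRECONDITION & SPEC =====
-- On books = [] A returns float('-inf') (not an int) and B raises ValueError; excluded.
def Pre_maximumBooks (books : List Int) : Prop := books ≠ []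
instance (books : List Int) : Decidable (Pre_maximumBooks books) := by
  unfold Pre_maximumBooks; infer_instance
def pvWitness_maximumBooks : List Int := [1]

def Spec_maximumBooks (books : List Int) (out : Int) : Prop := out = maximumBooks_alt books
instance (books : List Int) (out : Int) : Decidable (Spec_maximumBooks books out) := by
  unfold Spec_maximumBooks; infer_instance

-- ===== CLAIM (what is proved, stated in full; the proofs are below) =====
def Claim_equal_maximumBooks : Prop := ∀ (books : List Int), Dom_maximumBooks books → Pre_maximumBooks books → Spec_maximumBooks books (maximumBooks books)

-- ===== LEMMAS AND PROOFS =====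

-- value A computes for start index i
def T (books : List Int) (i : Nat) : Int :=
  loopA books i (books.getD i 0) (books.getD i 0)

-- key of index p in the monotonic stack
def ky (books : List Int) (p : Nat) : Int := books.getD p 0 - (p : Int)

-- stack invariant after processing indices 0 … i-1
def StInv (books : List Int) (i : Nat) (st : List Nat) : Prop :=
  st.Pairwise (fun a b => b < a ∧ ky books b < ky books a) ∧
  (∀ p : Nat, p ∈ st ↔ (p < i ∧ ∀ q : Nat, p < q → q < i → ky books p < ky books q))

theorem loopA_acc (books : List Int) :
    ∀ (k : Nat) (prev acc : Int), loopA books k prev acc = acc + loopA books k prev 0 := by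
  intro k
  induction k with
  | zero => intro prev acc; simp [loopA]
  | succ j ih =>
    intro prev acc
    simp only [loopA]
    split
    · simp
    · rw [ih _ (acc + _), ih _ (0 + _)]; ring

theorem loopA_nonpos (books : List Int) :
    ∀ (k : Nat) (prev : Int), prev ≤ 1 → loopA books k prev 0 = 0 := by
  intro k prev h
  cases k with
  | zero => simp [loopA]
  | succ j => simp only [loopA]; rw [if_pos (by omega : min (books.getD j 0) (prev-1) < 1)]

theorem loopA_descent (books : List Int) :
    ∀ (k : Nat) (prev : Int) (j : Int), -1 ≤ j → j < (k : Int) →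
    (∀ p : Nat, j < (p : Int) → p < k → books.getD p 0 ≥ prev - ((k : Int) - (p : Int))) →
    (0 ≤ j → books.getD j.toNat 0 < prev - ((k : Int) - j)) →
    2 * loopA books k prev 0 =
      (max 0 (min ((k : Int) - 1 - j) (prev - 1))) *
        (2 * prev - (max 0 (min ((k : Int) - 1 - j) (prev - 1))) - 1) +
      2 * (if max 0 (min ((k : Int) - 1 - j) (prev - 1)) = (k : Int) - 1 - j ∧ 0 ≤ j ∧
              1 ≤ books.getD j.toNat 0
           then T books j.toNat else 0) := by
  intro k
  induction k with
  | zero =>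
    intro prev j h1 h2 _ _
    have hj : j = -1 := by omega
    subst hj
    simp [loopA]
  | succ k ih =>
    intro prev j h1 h2 hseg hbd
    push_cast
    simp only [loopA]
    by_cases hjk : j = (k : Int)
    · -- boundary is immediately below the start
      have hjt : j.toNat = k := by omega
      have hblt : books.getD k 0 < prev - 1 := by
        have := hbd (by omega)
        rw [hjt] at this; push_cast at this; omega
      have hc : min (books.getD k 0) (prev - 1) = books.getD k 0 := by omega
      rw [hc]
      have ht : max 0 (min (((k:Int) + 1) - 1 - j) (prev - 1)) = 0 := by omega
      rw [ht]
      by_cases hlt : books.getD k 0 < 1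
      · rw [if_pos hlt, if_neg (by rw [hjt]; omega)]
        ring
      · rw [if_neg hlt, if_pos (by refine ⟨by omega, by omega, by rw [hjt]; omega⟩)]
        rw [loopA_acc, hjt]
        have : T books k = books.getD k 0 + loopA books k (books.getD k 0) 0 := by
          rw [T, loopA_acc]
        omega
    · -- boundary strictly further left: the step is the pure arithmetic descent
      have hjk' : j < (k : Int) := by omega
      have hbk : books.getD k 0 ≥ prev - 1 := by
        have := hseg k (by omega) (by omega)
        push_cast at this; omega
      have hc : min (books.getD k 0) (prev - 1) = prev - 1 := by omega
      rw [hc]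
      by_cases hlt : prev - 1 < 1
      · rw [if_pos hlt]
        have ht : max 0 (min (((k:Int) + 1) - 1 - j) (prev - 1)) = 0 := by omega
        rw [ht, if_neg (by omega)]
        ring
      · rw [if_neg hlt, loopA_acc]
        have ihh := ih (prev - 1) j h1 hjk'
          (by
            intro p hp1 hp2
            have := hseg p hp1 (by omega)
            push_cast at this ⊢; omega)
          (by
            intro hj0
            have := hbd hj0
            push_cast at this ⊢; omega)
        set tB := max 0 (min (((k:Int) + 1) - 1 - j) (prev - 1)) with htB
        have ht' : max 0 (min ((k:Int) - 1 - j) ((prev - 1) - 1)) = tB - 1 := by omega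
        rw [ht'] at ihh
        have hcond : (tB - 1 = (k:Int) - 1 - j ∧ 0 ≤ j ∧ 1 ≤ books.getD j.toNat 0) ↔
            (tB = ((k:Int) + 1) - 1 - j ∧ 0 ≤ j ∧ 1 ≤ books.getD j.toNat 0) := by
          constructor <;> (rintro ⟨x1, x2, x3⟩; exact ⟨by omega, x2, x3⟩)
        rw [if_congr hcond rfl rfl] at ihh
        have htb1 : 1 ≤ tB := by omega
        set C := (if tB = ((k:Int) + 1) - 1 - j ∧ 0 ≤ j ∧ 1 ≤ books.getD j.toNat 0
            then T books j.toNat else 0) with hC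
        -- 2*((0 + (prev-1)) + loopA k (prev-1) 0) = tB*(2prev - tB - 1) + 2C
        have : 2 * loopA books k (prev - 1) 0 = (tB - 1) * (2 * (prev - 1) - (tB - 1) - 1) + 2 * C := ihh
        linear_combination this

theorem popW_eq_filter (books : List Int) (ki : Int) :
    ∀ (st : List Nat), st.Pairwise (fun a b => b < a ∧ ky books b < ky books a) →
    popW books ki st = st.filter (fun p => decide (books.getD p 0 - (p : Int) < ki)) := by
  intro st
  induction st with
  | nil => intro _; rfl
  | cons p rest ih =>
    intro hp
    rw [List.pairwise_cons] at hp
    simp only [popW, List.filter_cons]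
    by_cases h : books.getD p 0 - (p : Int) ≥ ki
    · have hd : (decide (books.getD p 0 - (p : Int) < ki)) = false := decide_eq_false (by omega)
      rw [if_pos h, ih hp.2, hd]
      simp
    · have hd : (decide (books.getD p 0 - (p : Int) < ki)) = true := decide_eq_true (by omega)
      have hall : ∀ q ∈ rest, books.getD q 0 - (q:Int) < ki := by
        intro q hq
        have h1 := (hp.1 q hq).2
        have h2 := (hp.1 q hq).1
        simp only [ky] at h1; omega
      rw [if_neg h, hd]
      simp only [if_true]
      rw [List.filter_eq_self.2 (by intro q hq; exact decide_eq_true (hall q hq))]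

theorem popped_boundary (books : List Int) (i : Nat) (st : List Nat)
    (hinv : StInv books i st) :
    ∀ p : Nat, (match popW books (ky books i) st with
                 | [] => (-1 : Int) | q :: _ => (q : Int)) < (p : Int) → p < i →
      ky books i ≤ ky books p := by
  obtain ⟨hpw, hchar⟩ := hinv
  have hfil := popW_eq_filter books (ky books i) st hpw
  suffices H : ∀ d p : Nat, i - p ≤ d →
      (match popW books (ky books i) st with
        | [] => (-1 : Int) | q :: _ => (q : Int)) < (p : Int) → p < i →
      ky books i ≤ ky books p by
    intro p hp1 hp2; exact H i p (by omega) hp1 hp2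
  intro d
  induction d with
  | zero => intro p h1 _ h3; omega
  | succ d ih =>
    intro p hd hj hpi
    by_cases hmem : p ∈ st
    · -- p is on the old stack; it cannot have survived the pop, so its key is ≥ ky i
      have hnotres : p ∉ popW books (ky books i) st := by
        intro hin
        cases hres : popW books (ky books i) st with
        | nil => rw [hres] at hin; exact absurd hin (List.not_mem_nil)
        | cons q tl =>
          rw [hres] at hin hj
          have hj' : (q : Int) < (p : Int) := hj
          rcases List.mem_cons.1 hin with h | h
          · subst h; omega
          · have hpw' : (popW books (ky books i) st).Pairwise
                (fun a b => b < a ∧ ky books b < ky books a) := by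
              rw [hfil]; exact hpw.filter _
            rw [hres, List.pairwise_cons] at hpw'
            have := (hpw'.1 p h).1
            omega
      rw [hfil, List.mem_filter] at hnotres
      have : ¬ (books.getD p 0 - (p : Int) < ky books i) := by
        intro hlt
        exact hnotres ⟨hmem, decide_eq_true hlt⟩
      simp only [ky] at *
      omega
    · -- p was never on the stack: some later q has key ≤ key p
      have := (hchar p)
      rw [iff_iff_implies_and_implies] at this
      have hno : ¬ (p < i ∧ ∀ q : Nat, p < q → q < i → ky books p < ky books q) :=
        fun hc => hmem (this.2 hc)
      push Not at hno
      obtain ⟨q, hq1, hq2, hq3⟩ := hno hpi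
      have := ih q (by omega) (by omega) hq2
      omega

theorem stinv_step (books : List Int) (i : Nat) (st : List Nat) (hinv : StInv books i st) :
    StInv books (i + 1) (i :: popW books (ky books i) st) := by
  obtain ⟨hpw, hchar⟩ := hinv
  have hfil := popW_eq_filter books (ky books i) st hpw
  have hressub : ∀ p, p ∈ popW books (ky books i) st →
      p ∈ st ∧ ky books p < ky books i := by
    intro p hp
    rw [hfil, List.mem_filter] at hp
    exact ⟨hp.1, of_decide_eq_true hp.2⟩
  constructor
  · rw [List.pairwise_cons]
    constructor
    · intro a ha
      obtain ⟨ha1, ha2⟩ := hressub a ha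
      have := ((hchar a).1 ha1).1
      exact ⟨this, ha2⟩
    · rw [hfil]; exact hpw.filter _
  · intro p
    constructor
    · intro hp
      rcases List.mem_cons.1 hp with h | h
      · subst h; exact ⟨by omega, fun q hq1 hq2 => by omega⟩
      · obtain ⟨h1, h2⟩ := hressub p h
        obtain ⟨h3, h4⟩ := (hchar p).1 h1
        refine ⟨by omega, fun q hq1 hq2 => ?_⟩
        by_cases hqi : q = i
        · subst hqi; exact h2
        · exact h4 q hq1 (by omega)
    · rintro ⟨h1, h2⟩
      by_cases hpi : p = i
      · subst hpi; exact List.mem_cons_self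
      · have hplt : p < i := by omega
        have hmem : p ∈ st := (hchar p).2 ⟨hplt, fun q hq1 hq2 => h2 q hq1 (by omega)⟩
        refine List.mem_cons_of_mem _ ?_
        rw [hfil, List.mem_filter]
        exact ⟨hmem, decide_eq_true (h2 i hplt (by omega))⟩

theorem max?_append_singleton (l : List Int) (a : Int) :
    (l ++ [a]).max? = some (match l.max? with | none => a | some m => max a m) := by
  cases l with
  | nil => rfl
  | cons x xs =>
    simp only [List.cons_append, List.foldl_append, List.foldl_cons,
      List.foldl_nil, List.max?]
    rw [max_comm]

theorem getD_map_T (books : List Int) (n m : Nat) (h : m < n) :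
    ((List.range n).map (T books)).getD m 0 = T books m := by
  rw [List.getD_eq_getElem?_getD, List.getElem?_map, List.getElem?_range h]
  rfl

theorem foldA_spec (books : List Int) :
    ∀ (n : Nat),
      (List.range n).foldl
        (fun (mb : Option Int) i =>
          let start := books.getD i 0
          let tot := loopA books i start start
          some (match mb with | none => tot | some m => max tot m))
        none = ((List.range n).map (T books)).max? := by
  intro n
  induction n with
  | zero => rfl
  | succ n ih =>
    rw [List.range_succ, List.foldl_append, ih, List.map_append,
      List.foldl_cons, List.foldl_nil, List.map_cons, List.map_nil, max?_append_singleton]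
    simp only [T]

theorem foldB_spec (books : List Int) :
    ∀ (n : Nat),
      StInv books n ((List.range n).foldl (stepB books) ([], [])).1 ∧
      ((List.range n).foldl (stepB books) ([], [])).2 = (List.range n).map (T books) := by
  intro n
  induction n with
  | zero =>
    refine ⟨⟨List.Pairwise.nil, fun p => ?_⟩, rfl⟩
    simp
  | succ n ih =>
    rw [List.range_succ, List.foldl_append, List.foldl_cons, List.foldl_nil]
    rcases hP : (List.range n).foldl (stepB books) ([], []) with ⟨S, D⟩
    rw [hP] at ih
    obtain ⟨hst, hdp⟩ := ih
    simp only [stepB]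
    have hky : books.getD n 0 - (n : Int) = ky books n := rfl
    rw [hky]
    set j : Int := (match popW books (ky books n) S with
      | [] => (-1 : Int) | p :: _ => (p : Int)) with hjdef
    -- facts about the boundary j
    have hressub : ∀ p, p ∈ popW books (ky books n) S →
        p ∈ S ∧ ky books p < ky books n := by
      intro p hp
      rw [popW_eq_filter books _ S hst.1, List.mem_filter] at hp
      exact ⟨hp.1, of_decide_eq_true hp.2⟩
    have f1 : -1 ≤ j := by
      rw [hjdef]
      cases popW books (ky books n) S with
      | nil => exact le_refl _
      | cons p tl => show (-1 : Int) ≤ (p : Int); omega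
    have f2 : j < (n : Int) := by
      rw [hjdef]
      cases hres : popW books (ky books n) S with
      | nil => show (-1 : Int) < (n : Int); omega
      | cons p tl =>
        have hmem := (hressub p (by rw [hres]; exact List.mem_cons_self)).1
        have := ((hst.2 p).1 hmem).1
        show (p : Int) < (n : Int); omega
    have f3 : ∀ p : Nat, j < (p : Int) → p < n →
        books.getD p 0 ≥ books.getD n 0 - ((n : Int) - (p : Int)) := by
      intro p hp1 hp2
      have := popped_boundary books n S hst p (by rw [← hjdef]; exact hp1) hp2
      simp only [ky] at this; omega
    have f4 : 0 ≤ j → books.getD j.toNat 0 < books.getD n 0 - ((n : Int) - j) := by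
      intro hj0
      rcases hres : popW books (ky books n) S with _ | ⟨p, tl⟩
      · rw [hres] at hjdef
        have : j = -1 := hjdef
        omega
      · rw [hres] at hjdef
        have hjp : j = (p : Int) := hjdef
        have hkey := (hressub p (by rw [hres]; exact List.mem_cons_self)).2
        simp only [ky] at hkey
        rw [hjp]
        simp only [Int.toNat_natCast]
        omega
    constructor
    · -- stack invariant
      exact stinv_step books n S hst
    · -- dp entries
      have hdp' : D = (List.range n).map (T books) := hdp
      rw [List.map_append, List.map_cons, List.map_nil, ← hdp']
      congr 1
      congr 1
      -- remains: the new dp entry equals T books n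
      have hT : T books n = books.getD n 0 + loopA books n (books.getD n 0) 0 := by
        rw [T, loopA_acc]
      by_cases hbi : books.getD n 0 < 1
      · rw [if_pos hbi, hT, loopA_nonpos books n _ (by omega)]; omega
      · rw [if_neg hbi]
        have hdes := loopA_descent books n (books.getD n 0) j f1 f2 f3 f4
        set tA := max 0 (min ((n : Int) - 1 - j) (books.getD n 0 - 1)) with htAdef
        set t := min ((n : Int) - j) (books.getD n 0) with htdef
        have htA : tA = t - 1 := by omega
        rw [htA] at hdes
        have hcond : (t = (n : Int) - j ∧ 0 ≤ j ∧ 1 ≤ books.getD j.toNat 0) ↔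
            (t - 1 = (n : Int) - 1 - j ∧ 0 ≤ j ∧ 1 ≤ books.getD j.toNat 0) := by
          constructor <;> (rintro ⟨x1, x2, x3⟩; exact ⟨by omega, x2, x3⟩)
        by_cases hc : t = (n : Int) - j ∧ 0 ≤ j ∧ 1 ≤ books.getD j.toNat 0
        · rw [if_pos hc, if_pos (hcond.1 hc)] at *
          have hjn : j.toNat < n := by omega
          have hDj : D.getD j.toNat 0 = T books j.toNat := by
            have hdp' : D = (List.range n).map (T books) := hdp
            rw [hdp']; exact getD_map_T books n j.toNat hjn
          have hnum : t * (2 * books.getD n 0 - t + 1) =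
              2 * (books.getD n 0 + loopA books n (books.getD n 0) 0
                    - T books j.toNat) := by linear_combination -hdes
          rw [hnum, PySem.Int.floordiv_eq_ediv_of_pos (by norm_num),
            Int.mul_ediv_cancel_left _ (by norm_num), hDj, hT]
          ring
        · rw [if_neg hc, if_neg (fun h => hc (hcond.2 h))] at *
          have hnum : t * (2 * books.getD n 0 - t + 1) =
              2 * (books.getD n 0 + loopA books n (books.getD n 0) 0) := by
            linear_combination -hdes
          rw [hnum, PySem.Int.floordiv_eq_ediv_of_pos (by norm_num),
            Int.mul_ediv_cancel_left _ (by norm_num), hT]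

-- ===== VERDICT (by name: the statement is the Claim_ definition above) =====
theorem maximumBooks_spec : Claim_equal_maximumBooks := by
  intro books _ _
  unfold Spec_maximumBooks maximumBooks maximumBooks_alt
  rw [foldA_spec, (foldB_spec books books.length).2]
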